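-- pv_equiv track=rewrite | github.com/Willgunter/willgpt | evals/eleuther-ai-evals/eleuther-ai-eval.py | _parse_csv_or_repeat
-- ===== SOURCE A (Python) =====
-- def _parse_csv_or_repeat(values: list[str] | None) -> list[str] | None:
--     if not values:
--         return None
--     parsed: list[str] = []
--     for value in values:
--         parts = [p.strip() for p in value.split(",")]
--         parsed.extend([p for p in parts if p])
--     return parsed or None
-- ===== SOURCE B (Python) =====
-- def _parse_csv_or_repeat(values):
--     if not values:
--         return None
--     parsed = []
--     token = []    # chars of the current token; leading whitespace never enters
--     pending = []  # whitespace seen after token chars, committed only if more follow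
--     for value in values:
--         for ch in value:
--             if ch == ",":
--                 if token:
--                     parsed.append("".join(token))
--                 token = []
--                 pending = []
--             elif ch.isspace():
--                 if token:
--                     pending.append(ch)
--             else:
--                 token.extend(pending)
--                 token.append(ch)
--                 pending = []
--         if token:
--             parsed.append("".join(token))
--         token = []
--         pending = []
--     return parsed or None
-- ===== Notes on version B (the rewrite author's own statement) =====
-- stated objective: alternative
-- what changed: Replaces split-on-comma + per-part strip + filter by a single character-level state machine that builds tokens incrementally (drops leading whitespace, buffers interior whitespace, flushes on commas), using no split/strip/join at all.
import Mathlib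
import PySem

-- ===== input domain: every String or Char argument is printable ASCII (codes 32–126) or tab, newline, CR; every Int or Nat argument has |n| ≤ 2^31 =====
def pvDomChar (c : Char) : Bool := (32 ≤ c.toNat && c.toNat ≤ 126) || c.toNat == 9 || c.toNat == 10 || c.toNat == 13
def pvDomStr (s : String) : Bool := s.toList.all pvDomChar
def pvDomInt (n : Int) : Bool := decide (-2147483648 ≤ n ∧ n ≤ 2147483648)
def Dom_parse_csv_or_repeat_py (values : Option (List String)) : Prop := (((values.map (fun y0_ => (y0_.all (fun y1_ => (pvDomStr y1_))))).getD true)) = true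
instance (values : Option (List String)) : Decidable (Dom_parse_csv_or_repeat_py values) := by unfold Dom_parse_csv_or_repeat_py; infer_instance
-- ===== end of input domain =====

-- B replaces A's split/strip/filter pipeline by a single character-level state
-- machine building tokens incrementally (objective: alternative algorithm, same cost).

-- ===== PORT A =====
-- nested loop: for each value, split on ",", strip each part, keep non-empty
def parse_csv_or_repeat_py (values : Option (List String)) : Option (List String) :=
  match values with
  | none => none
  | some vs =>
    if vs.isEmpty then none          -- `if not values`
    else
      let parsed : List String := vs.foldl (fun parsed value =>
        -- parts = [p.strip() for p in value.split(",")]  (sep "," non-empty: splitOn exact)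
        let parts := ((PySem.Chars.splitOn value.toList [',']).map String.ofList).map
          (fun p => PySem.Str.strip p)
        -- parsed.extend([p for p in parts if p])
        parsed ++ parts.filter (fun p => p != "")) []
      if parsed.isEmpty then none else some parsed      -- `return parsed or None`

-- ===== PORT B =====
-- character-level scanner: `if token: parsed.append("".join(token))`
def altFlush (parsed : List String) (token : List Char) : List String :=
  if token.isEmpty then parsed else parsed ++ [String.ofList token]

-- one character step on (parsed, token, pending)
def altStep (st : List String × List Char × List Char) (ch : Char) :
    List String × List Char × List Char :=
  if ch = ',' then (altFlush st.1 st.2.1, [], [])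
  else if PySem.Chars.isspace ch then
    (st.1, st.2.1, if st.2.1.isEmpty then [] else st.2.2 ++ [ch])
  else (st.1, st.2.1 ++ st.2.2 ++ [ch], [])

-- loop body for one value: inner char loop, then end-of-value flush and reset
def altValue (st : List String × List Char × List Char) (value : String) :
    List String × List Char × List Char :=
  let st' := value.toList.foldl altStep st
  (altFlush st'.1 st'.2.1, [], [])

def parse_csv_or_repeat_py_alt (values : Option (List String)) : Option (List String) :=
  match values with
  | none => none
  | some vs =>
    if vs.isEmpty then none          -- `if not values`
    else
      let st := vs.foldl altValue ([], [], [])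
      if st.1.isEmpty then none else some st.1        -- `return parsed or None`

-- ===== PRECONDITION & SPEC =====
def Spec_parse_csv_or_repeat_py (values : Option (List String)) (out : Option (List String)) : Prop := out = parse_csv_or_repeat_py_alt values
instance (values : Option (List String)) (out : Option (List String)) : Decidable (Spec_parse_csv_or_repeat_py values out) := by unfold Spec_parse_csv_or_repeat_py; infer_instance

-- ===== CLAIM (what is proved, stated in full; the proofs are below) =====
def Claim_equal_parse_csv_or_repeat_py : Prop := ∀ (values : Option (List String)), Dom_parse_csv_or_repeat_py values → Spec_parse_csv_or_repeat_py values (parse_csv_or_repeat_py values)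

-- ===== LEMMAS AND PROOFS =====

-- clean structural split on a single character (proof reference only)
def spChar (c : Char) : List Char → List (List Char)
  | [] => [[]]
  | x :: xs => if x = c then [] :: spChar c xs else (spChar c xs).modifyHead (x :: ·)

theorem spChar_ne_nil (c : Char) (l : List Char) : spChar c l ≠ [] := by
  induction l with
  | nil => simp [spChar]
  | cons x xs ih =>
    simp only [spChar]
    split_ifs
    · simp
    · cases h : spChar c xs with
      | nil => exact absurd h ih
      | cons a t => simp [List.modifyHead]

theorem splitOn_go_eq (c : Char) (l : List Char) : ∀ (fuel : Nat) (cur : List Char) (acc : List (List Char)),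
    l.length ≤ fuel →
    PySem.Chars.splitOn.go [c] fuel l cur acc
      = acc.reverse ++ (spChar c l).modifyHead (cur.reverse ++ ·) := by
  induction l with
  | nil =>
    intro fuel cur acc _
    cases fuel <;> simp [PySem.Chars.splitOn.go, spChar, List.modifyHead]
  | cons x xs ih =>
    intro fuel cur acc hf
    cases fuel with
    | zero => simp at hf
    | succ f =>
      simp only [PySem.Chars.splitOn.go]
      by_cases hx : x = c
      · subst hx
        have hpre : [x].isPrefixOf (x :: xs) = true := by simp [List.isPrefixOf]
        rw [if_pos hpre]
        simp only [List.length, List.drop]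
        rw [ih f [] (cur.reverse :: acc) (by simpa using Nat.le_of_succ_le_succ hf)]
        simp [spChar]
        cases h : spChar x xs with
        | nil => exact absurd h (spChar_ne_nil x xs)
        | cons a t => simp [List.modifyHead]
      · have hpre : [c].isPrefixOf (x :: xs) = false := by
          simp [List.isPrefixOf]
          intro h; exact absurd h.symm hx
        rw [if_neg (by simp [hpre])]
        rw [ih f (x :: cur) acc (Nat.le_of_succ_le_succ (by simpa using hf))]
        simp [spChar, hx, List.modifyHead_modifyHead, Function.comp_def]

theorem splitOn_eq_spChar (c : Char) (l : List Char) :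
    PySem.Chars.splitOn l [c] = spChar c l := by
  unfold PySem.Chars.splitOn
  rw [splitOn_go_eq c l (l.length + 1) [] [] (Nat.le_succ _)]
  cases h : spChar c l with
  | nil => exact absurd h (spChar_ne_nil c l)
  | cons a t => simp [List.modifyHead]

-- whitespace-trim facts
theorem rstrip_append_ws (t p : List Char) (hp : p.all PySem.Chars.isspace = true) :
    PySem.Chars.rstrip (t ++ p) = PySem.Chars.rstrip t := by
  unfold PySem.Chars.rstrip
  rw [List.reverse_append, List.dropWhile_append]
  have : p.reverse.dropWhile PySem.Chars.isspace = [] := by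
    rw [List.dropWhile_eq_nil_iff]
    intro x hx
    exact (List.all_eq_true.mp hp) x (List.mem_reverse.mp hx)
  simp [this]

theorem rstrip_snoc_nonws (t : List Char) (c : Char) (hc : PySem.Chars.isspace c = false) :
    PySem.Chars.rstrip (t ++ [c]) = t ++ [c] := by
  unfold PySem.Chars.rstrip
  rw [List.reverse_append]
  simp [List.dropWhile_cons, hc]

-- the tokens the nested pipeline produces from the comma segments
def tokensOf (segs : List (List Char)) : List String :=
  ((segs.map PySem.Chars.strip).filter (fun l => l ≠ [])).map String.ofList

def optTok (t : List Char) : List String := if t = [] then [] else [String.ofList t]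

def mkFirst (tok pend seg : List Char) : List Char :=
  if tok = [] then PySem.Chars.strip seg else PySem.Chars.rstrip (tok ++ pend ++ seg)

def mkTokens (tok pend : List Char) : List (List Char) → List String
  | [] => []
  | seg :: rest => optTok (mkFirst tok pend seg) ++ tokensOf rest

theorem mkTokens_nil_nil (segs : List (List Char)) : mkTokens [] [] segs = tokensOf segs := by
  cases segs with
  | nil => simp [mkTokens, tokensOf]
  | cons seg rest =>
    simp only [mkTokens, mkFirst, tokensOf, List.map_cons, List.filter_cons]
    by_cases h : PySem.Chars.strip seg = []
    · simp [optTok, h]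
    · simp [optTok, h]

theorem flush_eq (parsed : List String) (tok pend : List Char)
    (hp : pend.all PySem.Chars.isspace = true) (ht : PySem.Chars.rstrip tok = tok) :
    altFlush parsed tok = parsed ++ optTok (mkFirst tok pend []) := by
  by_cases h : tok = []
  · simp [altFlush, optTok, mkFirst, h, PySem.Chars.strip, PySem.Chars.lstrip, PySem.Chars.rstrip]
  · have h2 : PySem.Chars.rstrip (tok ++ pend) = tok := by
      rw [rstrip_append_ws tok pend hp, ht]
    simp [altFlush, optTok, mkFirst, h, h2, List.isEmpty_iff]

-- main scanner invariant: finishing the char fold yields the stripped tokens of the segments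
theorem altStep_comma (p : List String) (t pe : List Char) :
    altStep (p, t, pe) ',' = (altFlush p t, [], []) := by simp [altStep]

theorem altStep_ws (p : List String) (t pe : List Char) (c : Char) (hc : c ≠ ',')
    (hw : PySem.Chars.isspace c = true) :
    altStep (p, t, pe) c = (p, t, if t.isEmpty then [] else pe ++ [c]) := by
  simp [altStep, hc, hw]

theorem altStep_other (p : List String) (t pe : List Char) (c : Char) (hc : c ≠ ',')
    (hw : PySem.Chars.isspace c = false) :
    altStep (p, t, pe) c = (p, t ++ pe ++ [c], []) := by
  simp [altStep, hc, hw]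

-- main scanner invariant: finishing the char fold yields the stripped tokens of the segments
theorem scan_eq (s : List Char) : ∀ (parsed : List String) (tok pend : List Char),
    pend.all PySem.Chars.isspace = true → (tok = [] → pend = []) →
    PySem.Chars.rstrip tok = tok →
    altFlush (s.foldl altStep (parsed, tok, pend)).1 (s.foldl altStep (parsed, tok, pend)).2.1
      = parsed ++ mkTokens tok pend (spChar ',' s) := by
  induction s with
  | nil =>
    intro parsed tok pend hp _ ht
    simpa [spChar, mkTokens, tokensOf] using flush_eq parsed tok pend hp ht
  | cons c s ih =>
    intro parsed tok pend hp hte ht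
    by_cases hc : c = ','
    · subst hc
      rw [List.foldl_cons, altStep_comma]
      rw [ih (altFlush parsed tok) [] [] rfl (fun _ => rfl) (by simp [PySem.Chars.rstrip])]
      rw [mkTokens_nil_nil, flush_eq parsed tok pend hp ht]
      simp [spChar, mkTokens, List.append_assoc]
    · obtain ⟨seg, rest, hsp⟩ : ∃ seg rest, spChar ',' s = seg :: rest := by
        cases h : spChar ',' s with
        | nil => exact absurd h (spChar_ne_nil ',' s)
        | cons a t => exact ⟨a, t, rfl⟩
      have hsp' : spChar ',' (c :: s) = (c :: seg) :: rest := by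
        simp [spChar, hc, hsp, List.modifyHead]
      by_cases hw : PySem.Chars.isspace c = true
      · rw [List.foldl_cons, altStep_ws parsed tok pend c hc hw]
        by_cases htok : tok = []
        · have hpe := hte htok
          subst htok; subst hpe
          rw [show (if ([] : List Char).isEmpty then ([] : List Char) else [] ++ [c]) = [] from rfl]
          rw [ih parsed [] [] rfl (fun _ => rfl) ht, hsp, hsp', mkTokens, mkTokens]
          have : mkFirst [] [] seg = mkFirst [] [] (c :: seg) := by
            simp [mkFirst, PySem.Chars.strip, PySem.Chars.lstrip, hw]
          rw [this]
        · rw [show (if tok.isEmpty then ([] : List Char) else pend ++ [c]) = pend ++ [c] by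
            simp [List.isEmpty_iff, htok]]
          rw [ih parsed tok (pend ++ [c]) (by simp_all) (fun h => absurd h htok) ht,
            hsp, hsp', mkTokens, mkTokens]
          have : mkFirst tok (pend ++ [c]) seg = mkFirst tok pend (c :: seg) := by
            simp [mkFirst, htok, List.append_assoc]
          rw [this]
      · have hw' : PySem.Chars.isspace c = false := by simpa using hw
        rw [List.foldl_cons, altStep_other parsed tok pend c hc hw']
        have hnew : PySem.Chars.rstrip (tok ++ pend ++ [c]) = tok ++ pend ++ [c] := by
          rw [List.append_assoc, ← List.append_assoc]
          exact rstrip_snoc_nonws (tok ++ pend) c hw'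
        rw [ih parsed (tok ++ pend ++ [c]) [] rfl (by simp) hnew, hsp, hsp',
          mkTokens, mkTokens]
        have : mkFirst (tok ++ pend ++ [c]) [] seg = mkFirst tok pend (c :: seg) := by
          by_cases htok : tok = []
          · have hpe := hte htok
            subst htok; subst hpe
            simp [mkFirst, PySem.Chars.strip, PySem.Chars.lstrip, hw']
          · simp [mkFirst, htok, List.append_assoc]
        rw [this]

-- B's outer fold accumulates the per-value tokens
theorem altValue_eq (st : List String × List Char × List Char) (v : String) :
    altValue st v = (altFlush (v.toList.foldl altStep st).1 (v.toList.foldl altStep st).2.1,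
      [], []) := rfl

theorem b_fold (vs : List String) : ∀ (parsed : List String),
    (vs.foldl altValue (parsed, [], [])).1
      = parsed ++ vs.flatMap (fun v => tokensOf (spChar ',' v.toList)) := by
  induction vs with
  | nil => intro parsed; simp
  | cons v ws ih =>
    intro parsed
    rw [List.foldl_cons, altValue_eq,
      scan_eq v.toList parsed [] [] rfl (fun _ => rfl) (by simp [PySem.Chars.rstrip]),
      mkTokens_nil_nil, ih, List.flatMap_cons, List.append_assoc]

theorem ofList_ne_empty (l : List Char) : (String.ofList l != "") = decide (l ≠ []) := by
  cases l with
  | nil => rfl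
  | cons c t =>
    simp only [ne_eq, decide_not]
    have : String.ofList (c :: t) ≠ "" := by
      intro h
      have := congrArg String.toList h
      simp at this
    simp [this]

-- A's per-value pipeline equals the stripped segment tokens
theorem a_value_aux (segs : List (List Char)) :
    (((segs.map String.ofList).map (fun p => PySem.Str.strip p)).filter (fun p => p != ""))
      = tokensOf segs := by
  induction segs with
  | nil => rfl
  | cons seg rest ih =>
    simp only [List.map_cons, List.filter_cons]
    rw [show PySem.Str.strip (String.ofList seg) = String.ofList (PySem.Chars.strip seg) by
        simp [PySem.Str.strip],
      ofList_ne_empty, ih]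
    by_cases h : PySem.Chars.strip seg = []
    · simp [tokensOf, h]
    · simp [tokensOf, h]

theorem a_value (v : String) :
    ((((PySem.Chars.splitOn v.toList [',']).map String.ofList).map
        (fun p => PySem.Str.strip p)).filter (fun p => p != ""))
      = tokensOf (spChar ',' v.toList) := by
  rw [splitOn_eq_spChar]
  exact a_value_aux _

theorem parsed_eq_flatMap (vs : List String) :
    List.foldl (fun parsed value =>
        parsed ++ ((((PySem.Chars.splitOn value.toList [',']).map String.ofList).map
          (fun p => PySem.Str.strip p)).filter (fun p => p != ""))) [] vs
      = vs.flatMap (fun v => tokensOf (spChar ',' v.toList)) := by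
  have := PySem.List.foldl_append_eq_flatMap
    (fun value : String => ((((PySem.Chars.splitOn value.toList [',']).map String.ofList).map
      (fun p => PySem.Str.strip p)).filter (fun p => p != ""))) vs ([] : List String)
  simp only [List.nil_append] at this
  rw [this]
  exact List.flatMap_congr (fun v _ => a_value v)

-- ===== VERDICT (by name: the statement is the Claim_ definition above) =====
theorem parse_csv_or_repeat_py_spec : Claim_equal_parse_csv_or_repeat_py := by
  intro values _
  show parse_csv_or_repeat_py values = parse_csv_or_repeat_py_alt values
  cases values with
  | none => rfl
  | some vs =>
    cases vs with
    | nil => rfl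
    | cons v ws =>
      simp only [parse_csv_or_repeat_py, parse_csv_or_repeat_py_alt, List.isEmpty_cons,
        Bool.false_eq_true, if_false]
      rw [parsed_eq_flatMap (v :: ws), b_fold (v :: ws) []]
      simp
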